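-- pv_equiv track=rewrite | github.com/boyeslab/cutandrun | Find_chromosome_distribution.py | get_chr_dist
-- ===== SOURCE A (Python) =====
-- def get_chr_no(chromosome):
--
--     chr_no = chromosome[3:]
--
--     if chr_no == 'X':
--         return 23
--     elif chr_no == 'Y':
--         return 24
--     elif chr_no == 'M':
--         return 25
--     else:
--         try:
--             return int(chr_no)
--         except:
--             return 26
--
-- def get_chr_dist(bed):
--
--
--     chrom_l = [x.split('\t')[0] for x in bed]
--     chrom_l.sort(key = lambda x: get_chr_no(x))
--
--     chrom_s = sorted(set(chrom_l), key = lambda x: get_chr_no(x))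
--     c = [0 for x in chrom_s]
--
--     chr_d = {k:v for k,v in zip(chrom_s, c)}
--
--     for chrom in chrom_l:
--         chr_d[chrom] += 1
--
--     chrom_d = {k:v for k, v in chr_d.items() if not 'gl' in k}
--
--     return chrom_d
-- ===== SOURCE B (Python) =====
-- def get_chr_no(chromosome):
--
--     chr_no = chromosome[3:]
--
--     if chr_no == 'X':
--         return 23
--     elif chr_no == 'Y':
--         return 24
--     elif chr_no == 'M':
--         return 25
--     else:
--         try:
--             return int(chr_no)
--         except:
--             return 26
--
--
-- def get_chr_dist(bed):
--     # One counting pass over the raw lines (no full-list sort, no zero-init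
--     # dict), then sort only the distinct names by chromosome number.
--     counts = {}
--     for line in bed:
--         name = line.split('\t')[0]
--         counts[name] = counts.get(name, 0) + 1
--     return {k: counts[k]
--             for k in sorted(counts, key=get_chr_no)
--             if 'gl' not in k}
-- ===== Notes on version B (the rewrite author's own statement) =====
-- stated objective: alternative
-- what changed: B replaces A's sort-the-whole-line-list + zero-initialised dict + increment loop + filter comprehension with a single counting pass over the lines followed by a sort of only the distinct chromosome names.
import Mathlib
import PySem

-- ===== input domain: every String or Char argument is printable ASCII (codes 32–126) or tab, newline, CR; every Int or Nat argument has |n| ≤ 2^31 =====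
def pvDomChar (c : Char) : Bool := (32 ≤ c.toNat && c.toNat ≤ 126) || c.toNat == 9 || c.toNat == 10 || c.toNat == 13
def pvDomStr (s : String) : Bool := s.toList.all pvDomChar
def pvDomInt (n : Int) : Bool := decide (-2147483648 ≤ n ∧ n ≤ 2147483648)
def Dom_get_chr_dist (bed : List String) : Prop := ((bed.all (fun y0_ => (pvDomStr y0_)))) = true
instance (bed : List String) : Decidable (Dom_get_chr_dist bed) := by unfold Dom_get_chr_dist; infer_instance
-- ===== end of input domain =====

-- B replaces A's sort of the whole line list + zero-initialised dict + increment loop by one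
-- counting pass over the lines followed by a sort of only the distinct names (return value only;
-- neither program mutates its argument).

-- ===== PORT A =====
-- shared helper of both Pythons
def get_chr_no (chromosome : String) : Int :=
  let chr_no := PySem.Str.slice chromosome (some 3) none
  if chr_no = "X" then 23
  else if chr_no = "Y" then 24
  else if chr_no = "M" then 25
  else
    match PySem.Int.ofStr? chr_no with   -- try: int(chr_no) except: 26
    | some n => n
    | none => 26

def get_chr_dist (bed : List String) : List (String × Int) :=
  -- x.split('\t')[0]: a split on a nonempty separator always returns at least one piece,
  -- so the [0] index is its head (exact, never raises)
  let chrom_l0 := bed.map (fun x => ((PySem.Str.split? x "\t").getD []).headD "")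
  let chrom_l := PySem.List.sorted chrom_l0 get_chr_no false
  let chrom_s := PySem.List.sorted (PySem.Set.ofList chrom_l) get_chr_no false
  let c := chrom_s.map (fun _ => (0 : Int))
  let chr_d0 := PySem.Dict.ofList (chrom_s.zip c)
  -- chr_d[chrom] += 1: every chrom is a key of chr_d, so the lookup never raises
  let chr_d := chrom_l.foldl (fun d chrom => d.insert chrom (d.getD chrom 0 + 1)) chr_d0
  let chrom_d := PySem.Dict.ofList (chr_d.items.filter (fun kv => !(PySem.Str.isIn "gl" kv.1)))
  chrom_d.items

-- ===== PORT B =====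
def get_chr_dist_alt (bed : List String) : List (String × Int) :=
  let counts := bed.foldl (fun d line =>
      let name := ((PySem.Str.split? line "\t").getD []).headD ""
      d.insert name (d.getD name 0 + 1)) PySem.Dict.empty
  ((PySem.List.sorted counts.keys get_chr_no false).filter
      (fun k => !(PySem.Str.isIn "gl" k))).map (fun k => (k, counts.getD k 0))

-- ===== PRECONDITION & SPEC =====
def Spec_get_chr_dist (bed : List String) (out : List (String × Int)) : Prop := out = get_chr_dist_alt bed
instance (bed : List String) (out : List (String × Int)) : Decidable (Spec_get_chr_dist bed out) := by unfold Spec_get_chr_dist; infer_instance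

-- ===== CLAIM (what is proved, stated in full; the proofs are below) =====
def Claim_equal_get_chr_dist : Prop := ∀ (bed : List String), Dom_get_chr_dist bed → Spec_get_chr_dist bed (get_chr_dist bed)

-- ===== LEMMAS AND PROOFS =====

-- proof-side helper: the first tab-field of a line
def fieldOf (x : String) : String := ((PySem.Str.split? x "\t").getD []).headD ""

-- first-occurrence dedup with an explicit 'already seen' accumulator: the recursion scheme of
-- List.foldl PySem.Set.add (proof-side helper only)
def dedupF (seen : List String) : List String → List String
  | [] => []
  | x :: xs => if seen.contains x then dedupF seen xs else x :: dedupF (seen ++ [x]) xs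

theorem foldl_add_eq_dedupF (l : List String) : ∀ s : List String,
    List.foldl PySem.Set.add s l = s ++ dedupF s l := by
  induction l with
  | nil => intro s; simp [dedupF]
  | cons x l ih =>
    intro s
    by_cases h : x ∈ s
    · simp [dedupF, PySem.Set.add, h, ih]
    · simp [dedupF, PySem.Set.add, h, ih (s ++ [x])]

theorem ofList_eq_dedupF (l : List String) : PySem.Set.ofList l = dedupF [] l := by
  have h := foldl_add_eq_dedupF l []
  simpa [PySem.Set.ofList, PySem.Set.empty] using h

theorem mem_of_mem_dedupF (x : String) (l : List String) : ∀ s : List String,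
    x ∈ dedupF s l → x ∈ l := by
  induction l with
  | nil => intro s h; simp [dedupF] at h
  | cons y l ih =>
    intro s h
    simp only [dedupF] at h
    split at h
    · exact List.mem_cons_of_mem _ (ih s h)
    · rcases List.mem_cons.mp h with rfl | h'
      · exact List.mem_cons_self ..
      · exact List.mem_cons_of_mem _ (ih (s ++ [y]) h')

theorem dedupF_congr_seen (l : List String) : ∀ s t : List String,
    (∀ y, y ∈ s ↔ y ∈ t) → dedupF s l = dedupF t l := by
  induction l with
  | nil => intro s t _; rfl
  | cons y l ih =>
    intro s t h
    have hc : s.contains y = t.contains y := by simp [h y]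
    simp only [dedupF, hc]
    split
    · exact ih s t h
    · exact congrArg _ (ih (s ++ [y]) (t ++ [y]) (by intro z; simp [List.mem_append, h z]))

theorem dedupF_seen_snoc (x : String) (l : List String) : ∀ s : List String, x ∉ l →
    dedupF (s ++ [x]) l = dedupF s l := by
  induction l with
  | nil => intro s _; rfl
  | cons y l ih =>
    intro s hx
    have hxy : y ≠ x := fun h => hx (by simp [h])
    have hx' : x ∉ l := fun h => hx (List.mem_cons_of_mem _ h)
    have hc : (s ++ [x]).contains y = s.contains y := by simp [List.mem_append, hxy]
    simp only [dedupF, hc]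
    split
    · exact ih s hx'
    · rw [dedupF_congr_seen l ((s ++ [x]) ++ [y]) ((s ++ [y]) ++ [x])
        (by intro z; simp [List.mem_append]; tauto), ih (s ++ [y]) hx']

theorem dedupF_snoc_mem (x : String) (l : List String) : ∀ s : List String,
    (x ∈ l ∨ x ∈ s) → dedupF s (l ++ [x]) = dedupF s l := by
  induction l with
  | nil =>
    intro s h
    rcases h with h | h
    · simp at h
    · simp [dedupF, h]
  | cons y l ih =>
    intro s h
    simp only [List.cons_append, dedupF]
    split
    · rename_i hy
      apply ih
      rcases h with h | h
      · rcases List.mem_cons.mp h with rfl | h'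
        · right; simpa using hy
        · left; exact h'
      · right; exact h
    · apply congrArg
      apply ih
      rcases h with h | h
      · rcases List.mem_cons.mp h with rfl | h'
        · right; simp
        · left; exact h'
      · right; simp [h]

theorem dedupF_snoc_not_mem (x : String) (l : List String) : ∀ s : List String,
    x ∉ l → x ∉ s → dedupF s (l ++ [x]) = dedupF s l ++ [x] := by
  induction l with
  | nil => intro s _ hs; simp [dedupF, hs]
  | cons y l ih =>
    intro s hl hs
    have hxy : x ≠ y := fun h => hl (by simp [h])
    have hl' : x ∉ l := fun h => hl (List.mem_cons_of_mem _ h)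
    simp only [List.cons_append, dedupF]
    split
    · exact ih s hl' hs
    · rw [ih (s ++ [y]) hl' (by simp [List.mem_append, hxy, hs])]
      simp

theorem insertBy_all_lt (x : String) (m : List String)
    (h : ∀ z ∈ m, get_chr_no x < get_chr_no z) :
    PySem.List.insertBy (fun a b => decide (get_chr_no a < get_chr_no b)) x m = x :: m := by
  cases m with
  | nil => rfl
  | cons z m => simp [PySem.List.insertBy, h z (by simp)]

theorem dedupF_insertBy_seen (x : String) (l : List String) : ∀ s : List String, x ∈ s →
    dedupF s (PySem.List.insertBy (fun a b => decide (get_chr_no a < get_chr_no b)) x l) =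
      dedupF s l := by
  induction l with
  | nil => intro s hx; simp [PySem.List.insertBy, dedupF, hx]
  | cons y l ih =>
    intro s hx
    simp only [PySem.List.insertBy]
    split
    · simp [dedupF, hx]
    · simp only [dedupF]
      split
      · exact ih s hx
      · exact congrArg _ (ih (s ++ [y]) (by simp [hx]))

theorem dedupF_insertBy_mem (x : String) (l : List String) : ∀ s : List String, x ∈ l →
    l.Pairwise (fun a b => get_chr_no a ≤ get_chr_no b) →
    dedupF s (PySem.List.insertBy (fun a b => decide (get_chr_no a < get_chr_no b)) x l) =
      dedupF s l := by
  induction l with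
  | nil => intro s hx _; simp at hx
  | cons y l ih =>
    intro s hx hp
    rcases List.pairwise_cons.mp hp with ⟨hy, hp'⟩
    have hlt : ¬ (get_chr_no x < get_chr_no y) := by
      rcases List.mem_cons.mp hx with rfl | h'
      · exact lt_irrefl _
      · exact not_lt.mpr (hy x h')
    simp only [PySem.List.insertBy]
    rw [if_neg (by simpa using hlt)]
    simp only [dedupF]
    split
    · rename_i hys
      rcases List.mem_cons.mp hx with rfl | h'
      · exact dedupF_insertBy_seen x l s (by simpa using hys)
      · exact ih s h' hp'
    · rcases List.mem_cons.mp hx with rfl | h'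
      · exact congrArg _ (dedupF_insertBy_seen x l (s ++ [x]) (by simp))
      · exact congrArg _ (ih (s ++ [y]) h' hp')

theorem dedupF_insertBy_not_mem (x : String) (l : List String) : ∀ s : List String, x ∉ l →
    x ∉ s → l.Pairwise (fun a b => get_chr_no a ≤ get_chr_no b) →
    dedupF s (PySem.List.insertBy (fun a b => decide (get_chr_no a < get_chr_no b)) x l) =
      PySem.List.insertBy (fun a b => decide (get_chr_no a < get_chr_no b)) x (dedupF s l) := by
  induction l with
  | nil => intro s _ hs _; simp [PySem.List.insertBy, dedupF, hs]
  | cons y l ih =>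
    intro s hl hs hp
    rcases List.pairwise_cons.mp hp with ⟨hy, hp'⟩
    have hxy : x ≠ y := fun h => hl (by simp [h])
    have hl' : x ∉ l := fun h => hl (List.mem_cons_of_mem _ h)
    by_cases hlt : get_chr_no x < get_chr_no y
    · rw [show PySem.List.insertBy (fun a b => decide (get_chr_no a < get_chr_no b)) x (y :: l)
          = x :: y :: l from by simp [PySem.List.insertBy, hlt]]
      have hall : ∀ z ∈ dedupF s (y :: l), get_chr_no x < get_chr_no z := by
        intro z hz
        rcases List.mem_cons.mp (mem_of_mem_dedupF z (y :: l) s hz) with rfl | h'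
        · exact hlt
        · exact lt_of_lt_of_le hlt (hy z h')
      rw [insertBy_all_lt x _ hall]
      have hstep : dedupF s (x :: y :: l) = x :: dedupF (s ++ [x]) (y :: l) := by
        simp only [dedupF]
        rw [if_neg (by simpa using hs)]
      rw [hstep, dedupF_seen_snoc x (y :: l) s hl]
    · rw [show PySem.List.insertBy (fun a b => decide (get_chr_no a < get_chr_no b)) x (y :: l)
          = y :: PySem.List.insertBy (fun a b => decide (get_chr_no a < get_chr_no b)) x l
          from by simp [PySem.List.insertBy, hlt]]
      simp only [dedupF]
      split
      · exact ih s hl' hs hp'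
      · rw [ih (s ++ [y]) hl' (by simp [List.mem_append, hxy, hs]) hp',
          show PySem.List.insertBy (fun a b => decide (get_chr_no a < get_chr_no b)) x
              (y :: dedupF (s ++ [y]) l)
            = y :: PySem.List.insertBy (fun a b => decide (get_chr_no a < get_chr_no b)) x
              (dedupF (s ++ [y]) l)
          from by simp [PySem.List.insertBy, hlt]]

theorem sorted_snoc (l : List String) (x : String) :
    PySem.List.sorted (l ++ [x]) get_chr_no false =
      PySem.List.insertBy (fun a b => decide (get_chr_no a < get_chr_no b)) x
        (PySem.List.sorted l get_chr_no false) := by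
  rw [PySem.List.sorted_eq_foldl_insertBy, PySem.List.sorted_eq_foldl_insertBy,
    List.foldl_append]
  rfl

-- dedup (= Python set(), first occurrences) commutes with the stable sort
theorem ofList_sorted_comm (xs : List String) :
    PySem.Set.ofList (PySem.List.sorted xs get_chr_no false) =
      PySem.List.sorted (PySem.Set.ofList xs) get_chr_no false := by
  induction xs using List.reverseRecOn with
  | nil => rfl
  | append_singleton xs x ih =>
    by_cases hx : x ∈ xs
    · have h1 : PySem.Set.ofList (xs ++ [x]) = PySem.Set.ofList xs := by
        rw [ofList_eq_dedupF, ofList_eq_dedupF, dedupF_snoc_mem x xs [] (Or.inl hx)]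
      rw [sorted_snoc, ofList_eq_dedupF,
        dedupF_insertBy_mem x _ [] ((PySem.List.mem_sorted xs get_chr_no false x).mpr hx)
          (PySem.List.sorted_pairwise xs get_chr_no),
        ← ofList_eq_dedupF, ih, h1]
    · have h1 : PySem.Set.ofList (xs ++ [x]) = PySem.Set.ofList xs ++ [x] := by
        rw [ofList_eq_dedupF, ofList_eq_dedupF, dedupF_snoc_not_mem x xs [] hx (by simp)]
      rw [sorted_snoc, ofList_eq_dedupF,
        dedupF_insertBy_not_mem x _ []
          (fun h => hx ((PySem.List.mem_sorted xs get_chr_no false x).mp h)) (by simp)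
          (PySem.List.sorted_pairwise xs get_chr_no),
        ← ofList_eq_dedupF, ih, h1, sorted_snoc]

theorem update_eq_self_of_subset (l : List String) : ∀ s : List String, (∀ x ∈ l, x ∈ s) →
    PySem.Set.update s l = s := by
  induction l with
  | nil => intro s _; rfl
  | cons y l ih =>
    intro s h
    have hy : PySem.Set.add s y = s := by simp [PySem.Set.add, h y (by simp)]
    calc PySem.Set.update s (y :: l) = PySem.Set.update (PySem.Set.add s y) l := rfl
      _ = PySem.Set.update s l := by rw [hy]
      _ = s := ih s (fun z hz => h z (by simp [hz]))

theorem zip_self_map (cs : List String) :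
    cs.zip (cs.map fun _ => (0 : Int)) = cs.map (fun k => (k, (0 : Int))) := by
  induction cs with
  | nil => rfl
  | cons a t ih => simp only [List.map_cons, List.zip_cons_cons, ih]

theorem items_ofList_fresh (pairs : List (String × Int))
    (h : (pairs.map (fun p => p.1)).Nodup) : (PySem.Dict.ofList pairs).items = pairs := by
  have h2 := PySem.Dict.items_foldl_insert_fresh pairs (fun p => p.1) (fun p => p.2)
    PySem.Dict.empty (fun a _ => PySem.Dict.contains_empty _) h
  simpa [PySem.Dict.ofList, PySem.Dict.update] using h2

theorem aux_items (cl : List String) :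
    ((PySem.List.sorted cl get_chr_no false).foldl
        (fun d chrom => d.insert chrom (d.getD chrom 0 + 1))
        (PySem.Dict.ofList
          ((PySem.List.sorted (PySem.Set.ofList cl) get_chr_no false).map
            (fun k => (k, (0 : Int)))))).items
      = (PySem.List.sorted (PySem.Set.ofList cl) get_chr_no false).map
          (fun k => (k, (cl.count k : Int))) := by
  set cs := PySem.List.sorted (PySem.Set.ofList cl) get_chr_no false with hcs
  have hnodcs : cs.Nodup := by
    rw [hcs]
    exact ((PySem.List.sorted_perm _ _ _).nodup_iff).mpr (PySem.Set.nodup_ofList cl)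
  have hnd0 : ((cs.map (fun k => (k, (0 : Int)))).map (fun p => p.1)).Nodup := by
    simpa [List.map_map, Function.comp_def] using hnodcs
  have hitems0 := items_ofList_fresh (cs.map (fun k => (k, (0 : Int)))) hnd0
  have hkeys0 : (PySem.Dict.ofList (cs.map (fun k => (k, (0 : Int))))).keys = cs := by
    simp [PySem.Dict.keys, hitems0, List.map_map, Function.comp_def]
  have hnod0 : (PySem.Dict.ofList (cs.map (fun k => (k, (0 : Int))))).keys.Nodup := by
    rw [hkeys0]; exact hnodcs
  have hgetD0 : ∀ k ∈ cs, (PySem.Dict.ofList (cs.map (fun k => (k, (0 : Int))))).getD k 0 = 0 := by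
    intro k hk
    exact PySem.Dict.getD_of_mem_items _
      (by rw [hitems0]; exact List.mem_map.mpr ⟨k, hk, rfl⟩) hnod0 0
  have hkeys : ((PySem.List.sorted cl get_chr_no false).foldl
      (fun d chrom => d.insert chrom (d.getD chrom 0 + 1))
      (PySem.Dict.ofList (cs.map (fun k => (k, (0 : Int)))))).keys = cs := by
    rw [PySem.Dict.keys_foldl_insert, hkeys0]
    refine update_eq_self_of_subset _ cs ?_
    intro z hz
    rw [hcs, PySem.List.mem_sorted, PySem.Set.mem_ofList]
    exact (PySem.List.mem_sorted cl get_chr_no false z).mp hz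
  have hnodk : ((PySem.List.sorted cl get_chr_no false).foldl
      (fun d chrom => d.insert chrom (d.getD chrom 0 + 1))
      (PySem.Dict.ofList (cs.map (fun k => (k, (0 : Int)))))).keys.Nodup := by
    rw [hkeys]; exact hnodcs
  rw [PySem.Dict.items_eq_map_keys _ hnodk 0, hkeys]
  refine List.map_congr_left ?_
  intro k hk
  rw [PySem.Dict.getD_foldl_insert_add_one, hgetD0 k hk,
    (PySem.List.sorted_perm cl get_chr_no false).count_eq k]
  simp

theorem a_eq (bed : List String) :
    get_chr_dist bed =
      ((PySem.List.sorted (PySem.Set.ofList (bed.map fieldOf)) get_chr_no false).filter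
          (fun k => !(PySem.Str.isIn "gl" k))).map
        (fun k => (k, ((bed.map fieldOf).count k : Int))) := by
  simp only [get_chr_dist]
  rw [show (fun x : String => ((PySem.Str.split? x "\t").getD []).headD "") = fieldOf from rfl]
  rw [ofList_sorted_comm, PySem.List.sorted_sorted, zip_self_map, aux_items, List.filter_map,
    items_ofList_fresh]
  · simp [Function.comp_def]
  · simpa [List.map_map, Function.comp_def] using
      List.Nodup.filter _
        (((PySem.List.sorted_perm (PySem.Set.ofList (bed.map fieldOf)) get_chr_no
          false).nodup_iff).mpr (PySem.Set.nodup_ofList _))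

theorem alt_eq (bed : List String) :
    get_chr_dist_alt bed =
      ((PySem.List.sorted (PySem.Set.ofList (bed.map fieldOf)) get_chr_no false).filter
          (fun k => !(PySem.Str.isIn "gl" k))).map
        (fun k => (k, ((bed.map fieldOf).count k : Int))) := by
  have hc : (bed.foldl (fun d line =>
        d.insert (((PySem.Str.split? line "\t").getD []).headD "")
          (d.getD (((PySem.Str.split? line "\t").getD []).headD "") 0 + 1))
        PySem.Dict.empty) = PySem.Dict.counter (bed.map fieldOf) := by
    rw [← PySem.Dict.foldl_insert_getD_add_one_eq_counter, List.foldl_map]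
    rfl
  simp only [get_chr_dist_alt]
  rw [hc]
  simp only [PySem.Dict.keys_counter, PySem.Dict.getD_counter]

-- ===== VERDICT (by name: the statement is the Claim_ definition above) =====
theorem get_chr_dist_spec : Claim_equal_get_chr_dist := by
  intro bed _
  unfold Spec_get_chr_dist
  rw [a_eq, alt_eq]
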